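-- pv_equiv track=rewrite | github.com/EndruK/CodeRecommendations | Seq2Seq_Pytorch_test/Utils/nltk_tokenizer.py | join_inv_token
-- ===== SOURCE A (Python) =====
-- def join_inv_token(tokens):
--     """
--     join the tokens "<", "INV", ">" together
--     """
--     # word tokenizer slices <INV>
--     for i, t in enumerate(tokens):
--         if t == "INV" and i > 0 and i < len(tokens) - 1:
--             if tokens[i - 1] == "<" and tokens[i + 1] == ">":
--                 new_token = tokens[i - 1] + tokens[i] + tokens[i + 1]
--                 tokens = tokens[:i - 1] + [new_token] + tokens[i + 2:]
--                 tokens[i - 1] = new_token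
--                 break
--     return tokens
-- ===== SOURCE B (Python) =====
-- def join_inv_token(tokens):
--     """
--     join the tokens "<", "INV", ">" together
--     """
--     # Index-driven walk with an accumulator: copy tokens until the first
--     # '<','INV','>' triple, merge it, then copy the rest verbatim.
--     out = []
--     i = 0
--     n = len(tokens)
--     while i < n:
--         if tokens[i] == "<" and i + 2 < n and tokens[i + 1] == "INV" and tokens[i + 2] == ">":
--             out.append("<INV>")
--             out.extend(tokens[i + 3:])
--             return out
--         out.append(tokens[i])
--         i += 1
--     return out
-- ===== Notes on version B (the rewrite author's own statement) =====
-- stated objective: alternative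
-- what changed: Replaces the enumerate-scan with slice-splice-and-set rebuild by a single accumulator walk that copies tokens and merges the first '<','INV','>' triple in place, returning early.
import Mathlib
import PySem

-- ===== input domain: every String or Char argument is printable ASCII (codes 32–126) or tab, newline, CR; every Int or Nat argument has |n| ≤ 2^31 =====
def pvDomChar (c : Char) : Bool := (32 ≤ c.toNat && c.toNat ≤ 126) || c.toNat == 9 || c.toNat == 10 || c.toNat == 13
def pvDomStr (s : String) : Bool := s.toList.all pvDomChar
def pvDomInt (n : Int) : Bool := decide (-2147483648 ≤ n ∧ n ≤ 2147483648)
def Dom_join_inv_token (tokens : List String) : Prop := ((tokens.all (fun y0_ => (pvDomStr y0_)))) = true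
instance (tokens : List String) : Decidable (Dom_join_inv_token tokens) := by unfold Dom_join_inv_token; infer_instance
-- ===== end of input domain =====

-- B merges the first '<','INV','>' triple during a single accumulator walk instead of
-- A's enumerate-scan followed by a slice-splice-and-set rebuild (return values proved equal).

-- ===== PORT A =====
-- the 'for i, t in enumerate(tokens): … break' loop; all reads/writes are guarded by
-- 'i > 0 and i < len(tokens) - 1', so every index is in range and pyGetD/pySetD are exact here
def joinALoop (tokens : List String) : List (Int × String) → List String
  | [] => tokens
  | (i, t) :: rest =>
    if t = "INV" ∧ 0 < i ∧ i < (tokens.length : Int) - 1 then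
      if PySem.List.pyGetD tokens (i - 1) "" = "<" ∧ PySem.List.pyGetD tokens (i + 1) "" = ">" then
        let newToken := PySem.List.pyGetD tokens (i - 1) "" ++ PySem.List.pyGetD tokens i "" ++
          PySem.List.pyGetD tokens (i + 1) ""
        let tokens' := PySem.List.slice tokens none (some (i - 1)) ++ [newToken] ++
          PySem.List.slice tokens (some (i + 2)) none
        PySem.List.pySetD tokens' (i - 1) newToken
      else joinALoop tokens rest
    else joinALoop tokens rest

def join_inv_token (tokens : List String) : List String :=
  joinALoop tokens (PySem.List.enumerate tokens)

-- ===== PORT B =====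
-- the while loop of Source B: acc holds 'out' (in reverse); early return on the first triple
def joinBWalk (acc : List String) : List String → List String
  | a :: b :: c :: rest =>
    if a = "<" ∧ b = "INV" ∧ c = ">" then acc.reverse ++ "<INV>" :: rest
    else joinBWalk (a :: acc) (b :: c :: rest)
  | x :: rest => joinBWalk (x :: acc) rest
  | [] => acc.reverse

def join_inv_token_alt (tokens : List String) : List String :=
  joinBWalk [] tokens

-- ===== PRECONDITION & SPEC =====
def Spec_join_inv_token (tokens : List String) (out : List String) : Prop := out = join_inv_token_alt tokens
instance (tokens : List String) (out : List String) : Decidable (Spec_join_inv_token tokens out) := by unfold Spec_join_inv_token; infer_instance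

-- ===== CLAIM (what is proved, stated in full; the proofs are below) =====
def Claim_equal_join_inv_token : Prop := ∀ (tokens : List String), Dom_join_inv_token tokens → Spec_join_inv_token tokens (join_inv_token tokens)

-- ===== LEMMAS AND PROOFS =====

-- accumulator-free description of B's walk
def walkSpec : List String → List String
  | a :: b :: c :: rest =>
    if a = "<" ∧ b = "INV" ∧ c = ">" then "<INV>" :: rest
    else a :: walkSpec (b :: c :: rest)
  | l => l

-- setting the element right after a prefix
theorem set_append_cons {α : Type} (l₁ l₂ : List α) (a b : α) :
    (l₁ ++ a :: l₂).set l₁.length b = l₁ ++ b :: l₂ := by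
  induction l₁ with
  | nil => simp
  | cons x xs ih => simp [ih]

-- A's redundant 'tokens[i-1] = new_token' write is an identity
theorem set_after_take {α : Type} (full l₂ : List α) (m : Nat) (hm : m ≤ full.length) (b : α) :
    (full.take m ++ b :: l₂).set m b = full.take m ++ b :: l₂ := by
  have h := set_append_cons (full.take m) l₂ b b
  rwa [List.length_take, Nat.min_eq_left hm] at h

-- B's accumulator walk computes walkSpec
theorem joinBWalk_eq (l : List String) : ∀ acc, joinBWalk acc l = acc.reverse ++ walkSpec l := by
  induction l using walkSpec.induct with
  | case1 a b c rest h => intro acc; simp [joinBWalk, walkSpec, h]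
  | case2 a b c rest h ih =>
      intro acc
      rw [joinBWalk, walkSpec, if_neg h, if_neg h, ih]
      simp
  | case3 x hx =>
      intro acc
      match x, hx with
      | [], _ => simp [joinBWalk, walkSpec]
      | [a], _ => simp [joinBWalk, walkSpec]
      | [a, b], _ => simp [joinBWalk, walkSpec]
      | a :: b :: c :: rest, hx => exact absurd rfl (by exact fun h => hx a b c rest h)

-- advancing the walk one position when no triple starts at k-1
theorem take_walk_step (full : List String) (k : Nat) (h1 : 1 ≤ k) (h2 : k < full.length)
    (hno : ¬ (full.getD (k-1) "" = "<" ∧ full.getD k "" = "INV" ∧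
              k + 1 < full.length ∧ full.getD (k+1) "" = ">")) :
    full.take (k-1) ++ walkSpec (full.drop (k-1)) = full.take k ++ walkSpec (full.drop k) := by
  obtain ⟨m, rfl⟩ : ∃ m, k = m + 1 := ⟨k - 1, by omega⟩
  simp only [Nat.add_sub_cancel] at *
  have hm : m < full.length := by omega
  have hdk1 : full.drop m = full[m] :: full.drop (m+1) := List.drop_eq_getElem_cons hm
  have htk : full.take (m+1) = full.take m ++ [full[m]] := by
    rw [List.take_add_one, List.getElem?_eq_getElem hm]; rfl
  have hgd1 : full.getD m "" = full[m] := List.getD_eq_getElem full "" hm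
  have hgdk : full.getD (m+1) "" = full[m+1]'h2 := List.getD_eq_getElem full "" h2
  rcases hrest : full.drop (m+1) with _ | ⟨t, rest⟩
  · exfalso; rw [List.drop_eq_nil_iff] at hrest; omega
  have ht : full[m+1]'h2 = t := by
    have := congrArg (fun l => l[0]?) hrest
    simpa [List.getElem?_drop, List.getElem?_eq_getElem h2] using this
  rcases rest with _ | ⟨c, rest2⟩
  · rw [hdk1, hrest]
    have w1 : walkSpec [t] = [t] := by simp [walkSpec]
    have w2 : walkSpec [full[m], t] = [full[m], t] := by simp [walkSpec]
    rw [w1, w2, htk, List.append_assoc]; rfl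
  · have hlen2 : m + 2 < full.length := by
      have := congrArg List.length hrest
      simp [List.length_drop] at this; omega
    have hc : full[m+2]'hlen2 = c := by
      have := congrArg (fun l => l[1]?) hrest
      simpa [List.getElem?_drop, List.getElem?_eq_getElem hlen2] using this
    have hgdk1 : full.getD (m+2) "" = full[m+2]'hlen2 := List.getD_eq_getElem full "" hlen2
    rw [hdk1, hrest]
    rw [walkSpec]
    rw [if_neg (by
      rintro ⟨u, v, w⟩
      exact hno ⟨by rw [hgd1]; exact u, by rw [hgdk, ht]; exact v, by omega,
        by rw [show m+1+1 = m+2 from rfl, hgdk1, hc]; exact w⟩)]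
    rw [htk, List.append_assoc]; rfl

-- A's scan from index k onward computes the walk on the k-1 suffix
theorem joinALoop_eq (full : List String) : ∀ (suf : List String) (k : Nat),
    1 ≤ k → k ≤ full.length → full.drop k = suf →
    joinALoop full (PySem.List.enumerate suf (k : Int)) =
      full.take (k-1) ++ walkSpec (full.drop (k-1)) := by
  intro suf
  induction suf with
  | nil =>
    intro k h1 h2 hd
    rw [PySem.List.enumerate_nil, joinALoop]
    have hk : k = full.length := by
      rw [List.drop_eq_nil_iff] at hd; omega
    subst hk
    have hm : full.length - 1 < full.length := by omega
    have hlast : full.drop (full.length - 1) =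
        full[full.length-1] :: full.drop (full.length - 1 + 1) := List.drop_eq_getElem_cons hm
    rw [show full.length - 1 + 1 = full.length from by omega, List.drop_length] at hlast
    rw [hlast]
    have w : walkSpec [full[full.length-1]'hm] = [full[full.length-1]'hm] := by simp [walkSpec]
    rw [w, ← hlast]
    exact (List.take_append_drop _ _).symm
  | cons t rest ih =>
    intro k h1 h2 hd
    obtain ⟨m, rfl⟩ : ∃ m, k = m + 1 := ⟨k - 1, by omega⟩
    simp only [Nat.add_sub_cancel] at *
    have hklen : m + 1 < full.length := by
      by_contra h
      rw [show full.drop (m+1) = [] from List.drop_eq_nil_iff.2 (by omega)] at hd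
      simp at hd
    have hgdm1 : full.getD (m+1) "" = full[m+1] := List.getD_eq_getElem full "" hklen
    have htval : full[m+1]'hklen = t := by
      have := congrArg (fun l => l[0]?) hd
      simpa [List.getElem?_drop, List.getElem?_eq_getElem hklen] using this
    have e1 : ((m+1 : Nat) : Int) - 1 = ((m : Nat) : Int) := by push_cast; ring
    have e2 : ((m+1 : Nat) : Int) + 1 = ((m+2 : Nat) : Int) := by push_cast; ring
    have e3 : ((m+1 : Nat) : Int) + 2 = ((m+3 : Nat) : Int) := by push_cast; ring
    have hm : m < full.length := by omega
    have hgdm : full.getD m "" = full[m] := List.getD_eq_getElem full "" hm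
    rw [PySem.List.enumerate_cons, joinALoop]
    by_cases hA : t = "INV" ∧ 0 < ((m+1 : Nat) : Int) ∧ ((m+1 : Nat) : Int) < (full.length : Int) - 1
    · rw [if_pos hA]
      have h2' : m + 2 < full.length := by
        have := hA.2.2; omega
      have hgdm2 : full.getD (m+2) "" = full[m+2] := List.getD_eq_getElem full "" h2'
      by_cases hB : PySem.List.pyGetD full (((m+1 : Nat) : Int) - 1) "" = "<" ∧
          PySem.List.pyGetD full (((m+1 : Nat) : Int) + 1) "" = ">"
      · rw [if_pos hB]
        rw [e1, e2] at hB
        simp only [PySem.List.pyGetD_natCast] at hB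
        -- the three elements
        have hv0 : full[m]'hm = "<" := by rw [← hgdm]; exact hB.1
        have hv1 : full[m+1]'hklen = "INV" := by rw [htval]; exact hA.1
        have hv2 : full[m+2]'h2' = ">" := by rw [← hgdm2]; exact hB.2
        simp only [e1, e2, e3, PySem.List.pyGetD_natCast, PySem.List.slice_to_natCast,
          PySem.List.slice_from_natCast, PySem.List.pySetD_natCast]
        rw [hgdm, hgdm1, hgdm2, hv0, hv1, hv2]
        have hnew : ("<" : String) ++ "INV" ++ ">" = "<INV>" := by decide
        rw [hnew]
        rw [List.append_assoc]
        simp only [List.singleton_append]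
        rw [set_after_take full (full.drop (m+3)) m hm.le "<INV>"]
        -- RHS: walkSpec (drop m)
        have d0 : full.drop m = full[m] :: full.drop (m+1) := List.drop_eq_getElem_cons hm
        have d1 : full.drop (m+1) = full[m+1] :: full.drop (m+2) := List.drop_eq_getElem_cons hklen
        have d2 : full.drop (m+2) = full[m+2] :: full.drop (m+3) := List.drop_eq_getElem_cons h2'
        rw [d0, d1, d2, hv0, hv1, hv2, walkSpec, if_pos ⟨rfl, rfl, rfl⟩]
      · rw [if_neg hB]
        have hrest : full.drop (m+2) = rest := by
          have h := List.drop_drop (l := full) (i := 1) (j := m+1)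
          rw [hd] at h
          simpa using h.symm
        have hrec := ih (m+2) (by omega) (by omega) hrest
        rw [show m + 2 - 1 = m + 1 from rfl] at hrec
        rw [show ((m+1 : Nat) : Int) + 1 = ((m+2 : Nat) : Int) from e2, hrec]
        refine (take_walk_step full (m+1) (by omega) hklen ?_).symm
        rintro ⟨u, v, w⟩
        exact hB ⟨by rw [e1]; simp only [PySem.List.pyGetD_natCast]; exact u,
          by rw [e2]; simp only [PySem.List.pyGetD_natCast]; exact w.2⟩
    · rw [if_neg hA]
      have hrest : full.drop (m+2) = rest := by
        have h := List.drop_drop (l := full) (i := 1) (j := m+1)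
        rw [hd] at h
        simpa using h.symm
      have hrec := ih (m+2) (by omega) (by omega) hrest
      rw [show m + 2 - 1 = m + 1 from rfl] at hrec
      rw [show ((m+1 : Nat) : Int) + 1 = ((m+2 : Nat) : Int) from e2, hrec]
      refine (take_walk_step full (m+1) (by omega) hklen ?_).symm
      rintro ⟨u, v, w⟩
      refine hA ⟨?_, by positivity, ?_⟩
      · rw [← htval, ← hgdm1]; exact v
      · have := w.1; push_cast; omega

-- ===== VERDICT (by name: the statement is the Claim_ definition above) =====
theorem join_inv_token_spec : Claim_equal_join_inv_token := by
  intro tokens _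
  unfold Spec_join_inv_token join_inv_token join_inv_token_alt
  rcases tokens with _ | ⟨t0, rest⟩
  · simp [PySem.List.enumerate_nil, joinALoop, joinBWalk]
  · rw [joinBWalk_eq, PySem.List.enumerate_cons, joinALoop]
    rw [if_neg (by rintro ⟨_, h, _⟩; exact lt_irrefl 0 h)]
    have h := joinALoop_eq (t0 :: rest) rest 1 le_rfl (by simp) rfl
    rw [show (0 : Int) + 1 = ((1 : Nat) : Int) from by norm_num, h]
    simp
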